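-- pv_equiv track=rewrite | github.com/olaDmenace/solTrader | src/trading/mev_protection.py | _check_transaction_clustering
-- ===== SOURCE A (Python) =====
-- from typing import Dict, Optional, Any, List, Tuple, Callable, Awaitable
--
-- def _check_transaction_clustering(txs: List[Dict[str, Any]]) -> bool:
--     """Check for suspicious transaction clustering"""
--     if len(txs) < 2:
--         return False
--
--     timestamps = [tx.get('blockTime', 0) for tx in txs]
--     timestamps.sort()
--
--     # Check for transactions too close together
--     for i in range(1, len(timestamps)):
--         if timestamps[i] - timestamps[i-1] < 2:
--             return True
--
--     return False
-- ===== SOURCE B (Python) =====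
-- from typing import Dict, Optional, Any, List, Tuple, Callable, Awaitable
--
-- def _check_transaction_clustering(txs: List[Dict[str, Any]]) -> bool:
--     """Check for suspicious transaction clustering (sort-free all-pairs scan)"""
--     if len(txs) < 2:
--         return False
--
--     rest = [tx.get('blockTime', 0) for tx in txs]
--     while rest:
--         x, rest = rest[0], rest[1:]
--         if any(abs(x - y) < 2 for y in rest):
--             return True
--     return False
-- ===== Notes on version B (the rewrite author's own statement) =====
-- stated objective: alternative
-- what changed: Replaces sort-then-adjacent-gap-scan with a sort-free all-pairs scan over suffixes that returns True on the first pair of timestamps within 2 of each other.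
import Mathlib
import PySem

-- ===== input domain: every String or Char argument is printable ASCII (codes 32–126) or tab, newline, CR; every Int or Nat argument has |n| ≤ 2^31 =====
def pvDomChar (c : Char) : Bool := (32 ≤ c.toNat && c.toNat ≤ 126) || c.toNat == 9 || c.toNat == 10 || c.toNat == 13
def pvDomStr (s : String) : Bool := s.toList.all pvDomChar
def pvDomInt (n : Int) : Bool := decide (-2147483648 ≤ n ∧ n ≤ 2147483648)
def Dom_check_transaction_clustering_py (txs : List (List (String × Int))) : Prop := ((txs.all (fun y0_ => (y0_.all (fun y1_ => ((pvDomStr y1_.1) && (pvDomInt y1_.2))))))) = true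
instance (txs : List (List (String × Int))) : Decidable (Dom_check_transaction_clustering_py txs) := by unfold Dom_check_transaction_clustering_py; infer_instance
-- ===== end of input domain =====

-- B replaces A's sort-then-adjacent-gap scan with a sort-free all-pairs scan over suffixes
-- (alternative algorithm, same return value on every input).

-- ===== PORT A =====
-- timestamps = [tx.get('blockTime', 0) for tx in txs]  (dict lookup = first match)
def pvTimes (txs : List (List (String × Int))) : List Int :=
  txs.map (fun tx => (PySem.Dict.mk tx).getD "blockTime" 0)

-- the loop 'for i in range(1, len(timestamps)): if ts[i] - ts[i-1] < 2: return True'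
def pvAdjLoop (ts : List Int) : List Int → Bool
  | [] => false
  | i :: rest => if PySem.List.pyGetD ts i 0 - PySem.List.pyGetD ts (i - 1) 0 < 2 then true
                 else pvAdjLoop ts rest

def check_transaction_clustering_py (txs : List (List (String × Int))) : Bool :=
  if txs.length < 2 then false
  else
    let timestamps := PySem.List.sorted (pvTimes txs) (fun x => x) false
    pvAdjLoop timestamps (PySem.List.pyRange 1 (timestamps.length) 1)

-- ===== PORT B =====
-- 'while rest: x, rest = rest[0], rest[1:]; if any(abs(x - y) < 2 for y in rest): return True'
def pvHasClose : List Int → Bool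
  | [] => false
  | x :: rest => if rest.any (fun y => decide (|x - y| < 2)) then true else pvHasClose rest

def check_transaction_clustering_py_alt (txs : List (List (String × Int))) : Bool :=
  if txs.length < 2 then false
  else pvHasClose (pvTimes txs)

-- ===== PRECONDITION & SPEC =====
def Spec_check_transaction_clustering_py (txs : List (List (String × Int))) (out : Bool) : Prop := out = check_transaction_clustering_py_alt txs
instance (txs : List (List (String × Int))) (out : Bool) : Decidable (Spec_check_transaction_clustering_py txs out) := by unfold Spec_check_transaction_clustering_py; infer_instance

-- ===== CLAIM (what is proved, stated in full; the proofs are below) =====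
def Claim_equal_check_transaction_clustering_py : Prop := ∀ (txs : List (List (String × Int))), Dom_check_transaction_clustering_py txs → Spec_check_transaction_clustering_py txs (check_transaction_clustering_py txs)

-- ===== LEMMAS AND PROOFS =====

-- the structural form of A's index loop over the sorted list
def pvChain : List Int → Bool
  | a :: b :: r => if b - a < 2 then true else pvChain (b :: r)
  | _ => false

lemma pvChain_short (l : List Int) (h : l.length ≤ 1) : pvChain l = false := by
  match l, h with
  | [], _ => rfl
  | [_], _ => rfl

-- A's index loop from index k+1 is pvChain on the k-th suffix
lemma pvAdjLoop_eq_chain (ts : List Int) :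
    ∀ d k, ts.length - k = d →
      pvAdjLoop ts (PySem.List.pyRange ((k : Int) + 1) ts.length 1) = pvChain (ts.drop k) := by
  intro d
  induction d with
  | zero =>
    intro k hk
    rw [PySem.List.pyRange_one_eq_nil (by omega)]
    rw [pvChain_short _ (by simp; omega)]
    rfl
  | succ d ih =>
    intro k hk
    by_cases hlt : k + 1 < ts.length
    · rw [PySem.List.pyRange_one_cons (by exact_mod_cast hlt)]
      have hk1 : k + 1 < ts.length := hlt
      have hk0 : k < ts.length := by omega
      have hd : ts.drop k = ts[k] :: ts[k + 1] :: ts.drop (k + 2) := by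
        rw [List.drop_eq_getElem_cons hk0, List.drop_eq_getElem_cons hk1]
      show pvAdjLoop ts (((k : Int) + 1) :: _) = _
      have e1 : PySem.List.pyGetD ts ((k : Int) + 1) 0 = ts[k + 1] := by
        have : ((k : Int) + 1) = ((k + 1 : Nat) : Int) := by push_cast; ring
        rw [this, PySem.List.pyGetD_natCast, List.getD_eq_getElem ts 0 hk1]
      have e0 : PySem.List.pyGetD ts ((k : Int) + 1 - 1) 0 = ts[k] := by
        have : ((k : Int) + 1 - 1) = ((k : Nat) : Int) := by omega
        rw [this, PySem.List.pyGetD_natCast, List.getD_eq_getElem ts 0 hk0]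
      have e2 : ((k : Int) + 1 + 1) = ((k + 1 : Nat) : Int) + 1 := by omega
      rw [pvAdjLoop, e1, e0, hd, pvChain, e2, ih (k + 1) (by omega)]
      rw [List.drop_eq_getElem_cons hk1]
    · rw [PySem.List.pyRange_one_eq_nil (by exact_mod_cast (by omega : (ts.length : Int) ≤ (k : Int) + 1))]
      rw [pvChain_short _ (by simp; omega)]
      rfl

-- on a ≤-sorted list, the adjacent-gap scan equals the all-pairs scan
lemma pvChain_eq_hasClose : ∀ (s : List Int), s.Pairwise (· ≤ ·) → pvChain s = pvHasClose s := by
  intro s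
  induction s with
  | nil => intro _; rfl
  | cons a t ih =>
    intro hp
    match t, hp with
    | [], _ => rfl
    | b :: r, hp =>
      have hab : a ≤ b := (List.pairwise_cons.mp hp).1 b (by simp)
      have htp : (b :: r).Pairwise (· ≤ ·) := (List.pairwise_cons.mp hp).2
      have hbr : ∀ y ∈ r, b ≤ y := (List.pairwise_cons.mp htp).1
      by_cases h : b - a < 2
      · have : |a - b| ≤ 1 := by rw [abs_sub_comm, abs_of_nonneg (by omega)]; omega
        simp [pvChain, pvHasClose, h]
        exact Or.inl (Or.inl this)
      · have hnone : ∀ y ∈ b :: r, ¬ |a - y| < 2 := by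
          intro y hy
          have hby : b ≤ y := by
            rcases List.mem_cons.mp hy with h1 | h1
            · omega
            · exact hbr y h1
          rw [abs_sub_comm, abs_of_nonneg (by omega)]
          omega
        have hany : (b :: r).any (fun y => decide (|a - y| < 2)) = false := by
          simp only [List.any_eq_false, decide_eq_true_eq]
          exact hnone
        rw [pvChain, if_neg h, pvHasClose, hany, if_neg (by simp)]
        exact ih htp

-- the all-pairs scan is invariant under permutation
lemma pvHasClose_perm : ∀ {l l' : List Int}, l.Perm l' → pvHasClose l = pvHasClose l' := by
  intro l l' h
  induction h with
  | nil => rfl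
  | cons x h ih =>
    rename_i t t'
    have hany : t.any (fun y => decide (|x - y| < 2)) = t'.any (fun y => decide (|x - y| < 2)) := by
      rw [Bool.eq_iff_iff]
      simp only [List.any_eq_true]
      exact ⟨fun ⟨y, hy, hp⟩ => ⟨y, h.mem_iff.mp hy, hp⟩, fun ⟨y, hy, hp⟩ => ⟨y, h.mem_iff.mpr hy, hp⟩⟩
    rw [pvHasClose, pvHasClose, hany, ih]
  | swap a b t =>
    simp only [pvHasClose, List.any_cons]
    rw [abs_sub_comm b a]
    by_cases hab : |a - b| < 2 <;> simp [hab, Bool.or_left_comm]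
  | trans h1 h2 ih1 ih2 => rw [ih1, ih2]

-- ===== VERDICT (by name: the statement is the Claim_ definition above) =====
theorem check_transaction_clustering_py_spec : Claim_equal_check_transaction_clustering_py := by
  intro txs _
  unfold Spec_check_transaction_clustering_py
  unfold check_transaction_clustering_py check_transaction_clustering_py_alt
  by_cases h : txs.length < 2
  · simp [h]
  · simp only [if_neg h]
    set s := PySem.List.sorted (pvTimes txs) (fun x => x) false with hs
    have h0 : pvAdjLoop s (PySem.List.pyRange (((0 : Nat) : Int) + 1) s.length 1) = pvChain (s.drop 0) :=
      pvAdjLoop_eq_chain s (s.length - 0) 0 rfl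
    simp only [Nat.cast_zero, zero_add, List.drop_zero] at h0
    rw [h0, pvChain_eq_hasClose s (PySem.List.sorted_pairwise (pvTimes txs) (fun x => x))]
    exact pvHasClose_perm (PySem.List.sorted_perm (pvTimes txs) (fun x => x) false)
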